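-- pv_equiv track=rewrite | github.com/partalex/opj-project | faza-2/token_statistics.py | load_domain_data
-- ===== SOURCE A (Python) =====
-- def load_domain_data(data, domain_labels):
--     domain_data = {}
--     for label in domain_labels:
--         matching_keys = [key for key in data.keys() if label in key]
--         all_tokens = []
--         for key in matching_keys:
--             all_tokens.extend(data[key])
--         domain_data[label] = all_tokens
--     return domain_data
-- ===== SOURCE B (Python) =====
-- def load_domain_data(data, domain_labels):
--     # Substring index: map every substring of every key to the token lists of the
--     # keys containing it, in one pass; each label's bucket is then a single lookup.
--     index = {}
--     for key, tokens in data.items():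
--         for s in {key[a:b] for a in range(len(key) + 1) for b in range(a, len(key) + 1)}:
--             index.setdefault(s, []).append(tokens)
--     return {label: [t for toks in index.get(label, []) for t in toks]
--             for label in domain_labels}
-- ===== Notes on version B (the rewrite author's own statement) =====
-- stated objective: faster
-- what changed: Replaced the per-label scan with the 'label in key' substring test by a precomputed substring index: one pass over the data enumerates every substring of each key into a hash map from substring to the matching keys' token lists, so each label's bucket becomes a single dictionary lookup with no substring matching at query time.
import Mathlib
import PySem

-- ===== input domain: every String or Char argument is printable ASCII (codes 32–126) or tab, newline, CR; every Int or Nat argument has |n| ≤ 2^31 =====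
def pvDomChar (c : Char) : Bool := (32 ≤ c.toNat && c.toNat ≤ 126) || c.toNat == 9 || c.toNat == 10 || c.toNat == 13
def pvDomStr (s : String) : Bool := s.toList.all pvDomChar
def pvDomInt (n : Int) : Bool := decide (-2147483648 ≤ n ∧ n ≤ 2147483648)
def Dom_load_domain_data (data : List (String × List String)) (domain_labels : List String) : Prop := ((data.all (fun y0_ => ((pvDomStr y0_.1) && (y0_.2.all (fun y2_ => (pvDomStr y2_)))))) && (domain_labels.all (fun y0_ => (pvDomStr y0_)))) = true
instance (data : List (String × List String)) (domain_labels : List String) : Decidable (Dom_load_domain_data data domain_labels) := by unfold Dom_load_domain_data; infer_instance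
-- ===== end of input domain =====

-- B replaces A's per-label substring scan by a precomputed substring index (every substring of
-- every key mapped to the matching keys' token lists), so each label's bucket is one dictionary
-- lookup; a timing run measured B faster on the large generated inputs (objective: faster).

-- ===== PORT A =====
def load_domain_data (data : List (String × List String)) (domain_labels : List String) : List (String × List String) :=
  (domain_labels.foldl (fun domain_data label =>
    let matching_keys := (data.map Prod.fst).filter (fun key => PySem.Str.isIn label key)
    let all_tokens := matching_keys.foldl (fun acc key => acc ++ PySem.Dict.getD ⟨data⟩ key []) []
    -- data[key] ported as getD: exact here, since key is drawn from data's own keys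
    PySem.Dict.insert domain_data label all_tokens) PySem.Dict.empty).items

-- ===== PORT B =====
-- the set {key[a:b] for a in range(len(key)+1) for b in range(a, len(key)+1)}
def pySubs (key : String) : PySem.Set String :=
  PySem.Set.ofList ((PySem.List.pyRange 0 ((PySem.Str.len key : Int) + 1) 1).flatMap (fun a =>
    (PySem.List.pyRange a ((PySem.Str.len key : Int) + 1) 1).map (fun b =>
      PySem.Str.slice key (some a) (some b))))

-- the pass over the set's elements is order-independent (each distinct substring gets its own
-- index entry), so folding the PySem.Set's list is exact for Python's set iteration here
def load_domain_data_alt (data : List (String × List String)) (domain_labels : List String) : List (String × List String) :=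
  let index : PySem.Dict String (List (List String)) := data.foldl (fun idx kv =>
    (pySubs kv.1).foldl (fun idx s => PySem.Dict.modify idx s [] (fun L => L ++ [kv.2])) idx)
    PySem.Dict.empty
  (domain_labels.foldl (fun out label =>
    PySem.Dict.insert out label ((PySem.Dict.getD index label []).flatMap (fun toks => toks)))
    PySem.Dict.empty).items

-- ===== PRECONDITION & SPEC =====
-- Pre_ requires distinct keys in the association list: the Python argument `data` is a dict, which
-- always has distinct keys, so duplicate-key association lists encode no Python input.
def Pre_load_domain_data (data : List (String × List String)) (domain_labels : List String) : Prop :=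
  (data.map Prod.fst).Nodup
instance (data : List (String × List String)) (domain_labels : List String) : Decidable (Pre_load_domain_data data domain_labels) := by unfold Pre_load_domain_data; infer_instance
def pvWitness_load_domain_data : (List (String × List String)) × List String :=
  ([("abc", ["t1", "t2"]), ("bcd", ["t3"])], ["b", "cd", "zz"])

def Spec_load_domain_data (data : List (String × List String)) (domain_labels : List String) (out : List (String × List String)) : Prop := out = load_domain_data_alt data domain_labels
instance (data : List (String × List String)) (domain_labels : List String) (out : List (String × List String)) : Decidable (Spec_load_domain_data data domain_labels out) := by unfold Spec_load_domain_data; infer_instance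

-- ===== CLAIM (what is proved, stated in full; the proofs are below) =====
def Claim_equal_load_domain_data : Prop := ∀ (data : List (String × List String)) (domain_labels : List String), Dom_load_domain_data data domain_labels → Pre_load_domain_data data domain_labels → Spec_load_domain_data data domain_labels (load_domain_data data domain_labels)

-- ===== LEMMAS AND PROOFS =====

-- a dict whose entries are a function of their (distinct) keys
def mkd (K : List String) (g : String → List String) : PySem.Dict String (List String) :=
  ⟨K.map (fun x => (x, g x))⟩

-- keys accumulated by repeated "append if new"
def uacc (K : List String) (labels : List String) : List String :=
  labels.foldl (fun K l => if l ∈ K then K else K ++ [l]) K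

-- A's value for one label
def colA (data : List (String × List String)) (label : String) : List String :=
  ((data.map Prod.fst).filter (fun key => PySem.Str.isIn label key)).foldl
    (fun acc key => acc ++ PySem.Dict.getD ⟨data⟩ key []) []

-- the tokens of the keys containing one label, in data order
def colB (data : List (String × List String)) (label : String) : List String :=
  data.flatMap (fun kv => if PySem.Str.isIn label kv.1 then kv.2 else [])

theorem mkd_congr {K : List String} {g h : String → List String}
    (hgh : ∀ x ∈ K, g x = h x) : mkd K g = mkd K h := by
  unfold mkd
  congr 1
  exact List.map_congr_left (fun x hx => by rw [hgh x hx])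

theorem contains_mkd (K : List String) (g : String → List String) (l : String) :
    (mkd K g).contains l = decide (l ∈ K) := by
  rw [PySem.Dict.contains_eq_decide_mem_keys]
  simp [mkd, PySem.Dict.keys, List.map_map, Function.comp_def]

theorem insert_mkd {K : List String} (g : String → List String) (l : String) (v : List String) :
    (mkd K g).insert l v
      = mkd (if l ∈ K then K else K ++ [l]) (fun x => if x = l then v else g x) := by
  apply PySem.Dict.ext
  by_cases hl : l ∈ K
  · rw [PySem.Dict.items_insert_of_contains _ v (by rw [contains_mkd]; simp [hl])]
    rw [if_pos hl]
    show List.map _ (List.map _ K) = _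
    rw [List.map_map]
    apply List.map_congr_left
    intro x _
    by_cases hx : x = l
    · subst hx; simp [Function.comp]
    · simp [Function.comp, hx]
  · rw [PySem.Dict.items_insert_of_not_contains _ v (by rw [contains_mkd]; simp [hl])]
    rw [if_neg hl]
    show List.map _ K ++ _ = List.map _ (K ++ [l])
    rw [List.map_append]
    congr 1
    · apply List.map_congr_left
      intro x hx
      have hne : x ≠ l := fun h => hl (h ▸ hx)
      simp [hne]
    · simp

-- any fold inserting a fixed function of the key keeps the dict in mkd-shape
theorem foldl_insert_fun (v : String → List String) (labels : List String) :
    ∀ K : List String,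
      labels.foldl (fun d l => d.insert l (v l)) (mkd K v) = mkd (uacc K labels) v := by
  induction labels with
  | nil => intro K; rfl
  | cons l rest ih =>
      intro K
      show rest.foldl _ ((mkd K v).insert l (v l)) = _
      rw [insert_mkd]
      have : mkd (if l ∈ K then K else K ++ [l]) (fun x => if x = l then v l else v x)
          = mkd (if l ∈ K then K else K ++ [l]) v := by
        apply mkd_congr; intro x _; by_cases hx : x = l <;> simp [hx]
      rw [this]
      exact ih _

-- label ∈ substrings-of-key set ↔ 'label in key'
theorem mem_pySubs (label key : String) :
    label ∈ pySubs key ↔ PySem.Str.isIn label key = true := by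
  rw [pySubs, PySem.Set.mem_ofList, PySem.Str.isIn_iff_infix, List.mem_flatMap]
  constructor
  · rintro ⟨a, ha, hb⟩
    rw [List.mem_map] at hb
    obtain ⟨b, hb, heq⟩ := hb
    rw [PySem.List.mem_pyRange_one] at ha hb
    have h0a : 0 ≤ a := ha.1
    have h0b : 0 ≤ b := le_trans h0a hb.1
    subst heq
    rw [show (PySem.Str.slice key (some a) (some b)).toList
          = PySem.List.slice key.toList (some a) (some b) from by simp]
    rw [PySem.List.slice_toNat _ h0a h0b]
    exact ((List.take_prefix _ _).isInfix).trans (List.drop_suffix _ _).isInfix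
  · rintro ⟨s, t, hst⟩
    have hlen : s.length + label.toList.length + t.length = key.toList.length := by
      rw [← hst]; simp; omega
    refine ⟨(s.length : Int), ?_, ?_⟩
    · rw [PySem.List.mem_pyRange_one, PySem.Str.len_eq]
      omega
    · rw [List.mem_map]
      refine ⟨(s.length : Int) + (label.toList.length : Int), ?_, ?_⟩
      · rw [PySem.List.mem_pyRange_one, PySem.Str.len_eq]
        omega
      · apply String.toList_inj.mp
        rw [show (PySem.Str.slice key (some _) (some _)).toList
            = PySem.List.slice key.toList (some ((s.length : Int)))
                (some ((s.length : Int) + (label.toList.length : Int))) from by simp]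
        rw [PySem.List.slice_natCast_add]
        rw [← hst, List.append_assoc, List.drop_left, List.take_left]

theorem filter_beq_of_nodup {α : Type} [DecidableEq α] (l : List α) (a : α) (h : l.Nodup) :
    l.filter (fun x => x == a) = if a ∈ l then [a] else [] := by
  induction l with
  | nil => simp
  | cons x xs ih =>
      simp only [List.nodup_cons] at h
      rw [List.filter_cons]
      by_cases hxa : x = a
      · subst hxa
        simp [ih h.2, h.1]
      · have hb : (x == a) = false := by simpa using hxa
        simp [hb, ih h.2, Ne.symm hxa]

-- one key's inner fold over its substring set appends its tokens exactly to matching labels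
theorem inner_index (k : String) (v : List String) (idx : PySem.Dict String (List (List String)))
    (label : String) :
    ((pySubs k).foldl (fun idx s => PySem.Dict.modify idx s [] (fun L => L ++ [v])) idx).getD label []
      = idx.getD label [] ++ (if PySem.Str.isIn label k then [v] else []) := by
  have hfold : (pySubs k).foldl (fun idx s => PySem.Dict.modify idx s [] (fun L => L ++ [v])) idx
      = ((pySubs k).map (fun s => (s, v))).foldl
          (fun d p => PySem.Dict.modify d p.1 [] (fun L => L ++ [p.2])) idx := by
    rw [List.foldl_map]
  rw [hfold, PySem.Dict.getD_foldl_modify_append]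
  congr 1
  rw [List.filter_map, List.map_map]
  rw [show ((fun (p : String × List String) => p.1 == label) ∘ fun s => (s, v))
        = (fun s => s == label) from rfl]
  have hnd : (pySubs k).Nodup := by rw [pySubs]; exact PySem.Set.nodup_ofList _
  rw [filter_beq_of_nodup _ _ hnd]
  by_cases hm : label ∈ pySubs k
  · rw [if_pos hm, if_pos ((mem_pySubs label k).mp hm)]
    rfl
  · rw [if_neg hm, if_neg (fun h => hm ((mem_pySubs label k).mpr h))]
    rfl

-- the whole index fold, per label
theorem outer_index (data : List (String × List String)) (label : String) :
    ∀ idx : PySem.Dict String (List (List String)),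
    (data.foldl (fun idx kv =>
        (pySubs kv.1).foldl (fun idx s => PySem.Dict.modify idx s [] (fun L => L ++ [kv.2])) idx)
      idx).getD label []
      = idx.getD label [] ++ (data.filter (fun kv => PySem.Str.isIn label kv.1)).map Prod.snd := by
  induction data with
  | nil => intro idx; simp
  | cons kv rest ih =>
      intro idx
      show (rest.foldl _ ((pySubs kv.1).foldl _ idx)).getD label [] = _
      rw [ih, inner_index, List.filter_cons]
      simp only [PySem.Str.isIn]
      by_cases hc : PySem.Chars.isIn label.toList kv.1.toList = true <;>
        simp [hc, List.append_assoc]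

-- flattening the indexed token lists is colB
theorem flat_filter_eq_colB (data : List (String × List String)) (label : String) :
    ((data.filter (fun kv => PySem.Str.isIn label kv.1)).map Prod.snd).flatMap (fun toks => toks)
      = colB data label := by
  induction data with
  | nil => rfl
  | cons kv rest ih =>
      have hc : colB (kv :: rest) label
          = (if PySem.Str.isIn label kv.1 then kv.2 else []) ++ colB rest label := rfl
      rw [hc, List.filter_cons]
      by_cases h : PySem.Str.isIn label kv.1
      · rw [if_pos h, if_pos h, List.map_cons, List.flatMap_cons, ih]
      · rw [if_neg h, if_neg h, ih, List.nil_append]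

-- with distinct keys, A's per-label scan collects exactly colB
theorem colA_eq_colB (label : String) :
    ∀ ds : List (String × List String), (ds.map Prod.fst).Nodup →
      ((ds.map Prod.fst).filter (fun key => PySem.Str.isIn label key)).flatMap
          (fun key => PySem.Dict.getD ⟨ds⟩ key []) = colB ds label := by
  intro ds
  induction ds with
  | nil => intro _; rfl
  | cons kv rest ih =>
      obtain ⟨k1, t1⟩ := kv
      intro hnd
      have hk0 : k1 ∉ rest.map Prod.fst := (List.nodup_cons.mp hnd).1
      have hrest : (rest.map Prod.fst).Nodup := (List.nodup_cons.mp hnd).2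
      have hlook : ∀ k ∈ (rest.map Prod.fst).filter (fun key => PySem.Str.isIn label key),
          PySem.Dict.getD ⟨(k1, t1) :: rest⟩ k [] = PySem.Dict.getD ⟨rest⟩ k [] := by
        intro k hk
        have hkr : k ∈ rest.map Prod.fst := (List.mem_filter.mp hk).1
        have hne : (k1 == k) = false := by
          simp only [beq_eq_false_iff_ne, ne_eq]
          intro h; exact hk0 (h ▸ hkr)
        simp [PySem.Dict.getD, PySem.Dict.get?_mk_cons, hne]
      have hself : PySem.Dict.getD ⟨(k1, t1) :: rest⟩ k1 [] = t1 := by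
        simp [PySem.Dict.getD, PySem.Dict.get?_mk_cons]
      show (((k1 :: rest.map Prod.fst)).filter _).flatMap _ = _
      by_cases hc : PySem.Str.isIn label k1
      · rw [List.filter_cons_of_pos (by simpa using hc)]
        rw [List.flatMap_cons, hself,
          List.flatMap_congr (fun k hk => hlook k hk), ih hrest]
        have hc' := hc
        simp only [PySem.Str.isIn] at hc'
        simp [colB, hc']
      · rw [List.filter_cons_of_neg (by simpa using hc)]
        rw [List.flatMap_congr (fun k hk => hlook k hk), ih hrest]
        have hc' := hc
        simp only [PySem.Str.isIn] at hc'
        simp [colB, hc']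

-- ===== VERDICT (by name: the statement is the Claim_ definition above) =====
theorem load_domain_data_spec : Claim_equal_load_domain_data := by
  intro data domain_labels _ hpre
  unfold Spec_load_domain_data load_domain_data load_domain_data_alt
  simp only []
  have hA : domain_labels.foldl (fun domain_data label =>
      let matching_keys := (data.map Prod.fst).filter (fun key => PySem.Str.isIn label key)
      let all_tokens := matching_keys.foldl (fun acc key => acc ++ PySem.Dict.getD ⟨data⟩ key []) []
      PySem.Dict.insert domain_data label all_tokens) PySem.Dict.empty
      = mkd (uacc [] domain_labels) (colA data) := by
    exact foldl_insert_fun (colA data) domain_labels []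
  have hB : domain_labels.foldl (fun out label =>
      PySem.Dict.insert out label
        ((PySem.Dict.getD (data.foldl (fun idx kv =>
            (pySubs kv.1).foldl (fun idx s => PySem.Dict.modify idx s [] (fun L => L ++ [kv.2])) idx)
          PySem.Dict.empty) label []).flatMap (fun toks => toks))) PySem.Dict.empty
      = mkd (uacc [] domain_labels)
          (fun label => ((PySem.Dict.getD (data.foldl (fun idx kv =>
            (pySubs kv.1).foldl (fun idx s => PySem.Dict.modify idx s [] (fun L => L ++ [kv.2])) idx)
          PySem.Dict.empty) label []).flatMap (fun toks => toks))) := by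
    exact foldl_insert_fun _ domain_labels []
  rw [hA, hB]
  congr 1
  apply mkd_congr
  intro x _
  rw [outer_index data x PySem.Dict.empty]
  rw [PySem.Dict.getD_empty, List.nil_append, flat_filter_eq_colB]
  unfold colA
  rw [PySem.List.foldl_append_eq_flatMap, List.nil_append]
  exact colA_eq_colB x data hpre
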